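-- pv_equiv track=rewrite | github.com/jpjp92/autoeval | backend/ingestion/llm_chunker.py | build_char_aware_batches
-- ===== SOURCE A (Python) =====
-- def build_char_aware_batches(
--     blocks: list[dict],
--     batch_size: int,
--     overlap: int,
--     max_chars: int = 4000,
-- ) -> list[tuple[int, list, list]]:
--     """블록 수(batch_size)와 누적 문자 수(max_chars) 중 먼저 도달한 기준으로 배치 분할.
--
--     표 블록(~1,600자) 포함 시 토큰 폭발 방지.
--     반환: [(batch_num, ctx_blocks, new_blocks), ...]
--     """
--     batches: list[tuple[int, list, list]] = []
--     i, batch_num = 0, 0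
--     while i < len(blocks):
--         new_blocks = []
--         char_count = 0
--         j = i
--         while j < len(blocks) and len(new_blocks) < batch_size:
--             block_chars = len(blocks[j]["text"])
--             if new_blocks and char_count + block_chars > max_chars:
--                 break
--             new_blocks.append(blocks[j])
--             char_count += block_chars
--             j += 1
--         ctx_blocks = blocks[max(0, i - overlap): i] if i > 0 else []
--         batch_num += 1
--         batches.append((batch_num, ctx_blocks, new_blocks))
--         i = j
--     return batches
-- ===== SOURCE B (Python) =====
-- def build_char_aware_batches(
--     blocks: list[dict],
--     batch_size: int,
--     overlap: int,
--     max_chars: int = 4000,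
-- ) -> list[tuple[int, list, list]]:
--     """Single pass over blocks: flush the running batch when either limit is hit."""
--     batches: list[tuple[int, list, list]] = []
--     cur: list = []
--     char_count = 0
--     batch_start = 0
--
--     def flush(start, group):
--         ctx = blocks[max(0, start - overlap):start] if start > 0 else []
--         batches.append((len(batches) + 1, ctx, group))
--
--     for j, block in enumerate(blocks):
--         n = len(block["text"])
--         if cur and (len(cur) >= batch_size or char_count + n > max_chars):
--             flush(batch_start, cur)
--             cur, char_count, batch_start = [], 0, j
--         cur.append(block)
--         char_count += n
--     if cur:
--         flush(batch_start, cur)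
--     return batches
-- ===== Notes on version B (the rewrite author's own statement) =====
-- stated objective: simpler
-- what changed: Replaced A's nested while-loops (outer batch loop plus inner i/j rescanning loop) by a single for-loop over blocks that keeps a running batch, its char count and its start index, flushing the batch before a block that would exceed either the count or the char limit.
import Mathlib
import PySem

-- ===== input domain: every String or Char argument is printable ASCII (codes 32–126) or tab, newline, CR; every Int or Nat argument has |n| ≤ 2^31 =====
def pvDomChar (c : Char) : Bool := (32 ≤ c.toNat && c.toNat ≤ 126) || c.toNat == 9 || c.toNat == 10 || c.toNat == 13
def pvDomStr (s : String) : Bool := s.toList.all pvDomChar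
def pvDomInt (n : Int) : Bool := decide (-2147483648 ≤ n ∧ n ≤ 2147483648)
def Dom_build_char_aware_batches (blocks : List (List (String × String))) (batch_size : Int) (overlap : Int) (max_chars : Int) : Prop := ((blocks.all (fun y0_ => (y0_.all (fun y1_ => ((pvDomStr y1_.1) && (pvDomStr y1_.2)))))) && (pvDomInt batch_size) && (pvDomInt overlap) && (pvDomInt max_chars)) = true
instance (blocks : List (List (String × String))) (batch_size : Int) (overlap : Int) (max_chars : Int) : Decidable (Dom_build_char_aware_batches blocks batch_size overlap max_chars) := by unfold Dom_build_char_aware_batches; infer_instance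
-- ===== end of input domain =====

-- B replaces A's nested while-loops by one pass with a running batch that is flushed
-- at the count/char limits (objective: simpler).

-- len(block["text"]): dict lookup (first match) then string length; Pre_ guarantees the key exists.
def pvTextLen (b : List (String × String)) : Int :=
  match PySem.Dict.get? (PySem.Dict.mk b) "text" with
  | some s => PySem.Str.len s
  | none => 0

-- blocks[max(0, i - overlap): i] if i > 0 else []
def pvCtx (blocks : List (List (String × String))) (i : Nat) (overlap : Int) : List (List (String × String)) :=
  if 0 < i then PySem.List.slice blocks (some (max 0 ((i : Int) - overlap))) (some (i : Int)) else []

-- ===== PORT A =====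
-- A's inner while loop: collects new_blocks from index j on.
def pvInnerA (blocks : List (List (String × String))) (batch_size max_chars : Int) (j : Nat) (nb : List (List (String × String))) (cc : Int) : List (List (String × String)) × Nat :=
  if h : j < blocks.length ∧ (nb.length : Int) < batch_size then
    let bc := pvTextLen blocks[j]
    if nb ≠ [] ∧ cc + bc > max_chars then (nb, j)
    else pvInnerA blocks batch_size max_chars (j + 1) (nb ++ [blocks[j]]) (cc + bc)
  else (nb, j)
termination_by blocks.length - j
decreasing_by omega

-- A's outer while loop.  The 'i < r.2' guard only makes the recursion total in Lean:
-- when batch_size ≤ 0 the Python loop never advances (it diverges); Pre_ excludes that.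
def pvOuterA (blocks : List (List (String × String))) (batch_size overlap max_chars : Int) (i : Nat) (bn : Int) (acc : List (Int × (List (List (String × String))) × (List (List (String × String))))) : List (Int × (List (List (String × String))) × (List (List (String × String)))) :=
  if hi : i < blocks.length then
    let r := pvInnerA blocks batch_size max_chars i [] 0
    let acc' := acc ++ [(bn + 1, pvCtx blocks i overlap, r.1)]
    if h : i < r.2 then pvOuterA blocks batch_size overlap max_chars r.2 (bn + 1) acc'
    else acc'
  else acc
termination_by blocks.length - i
decreasing_by simp only [r] at h; omega

def build_char_aware_batches (blocks : List (List (String × String))) (batch_size : Int) (overlap : Int) (max_chars : Int) : List (Int × (List (List (String × String))) × (List (List (String × String)))) :=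
  pvOuterA blocks batch_size overlap max_chars 0 0 []

-- ===== PORT B =====
-- B's single for-loop over blocks (rest = blocks[j:]), with a running batch cur,
-- its char_count, its start index, and the output accumulator.
def pvLoopB (blocks : List (List (String × String))) (batch_size overlap max_chars : Int) : List (List (String × String)) → Nat → List (List (String × String)) → Int → Nat → List (Int × (List (List (String × String))) × (List (List (String × String)))) → List (Int × (List (List (String × String))) × (List (List (String × String))))
  | [], _, cur, _, start, acc =>
      if cur = [] then acc
      else acc ++ [((acc.length : Int) + 1, pvCtx blocks start overlap, cur)]
  | b :: rest, j, cur, chars, start, acc =>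
      let n := pvTextLen b
      if cur ≠ [] ∧ (batch_size ≤ (cur.length : Int) ∨ chars + n > max_chars) then
        pvLoopB blocks batch_size overlap max_chars rest (j + 1) [b] n j
          (acc ++ [((acc.length : Int) + 1, pvCtx blocks start overlap, cur)])
      else
        pvLoopB blocks batch_size overlap max_chars rest (j + 1) (cur ++ [b]) (chars + n) start acc

def build_char_aware_batches_alt (blocks : List (List (String × String))) (batch_size : Int) (overlap : Int) (max_chars : Int) : List (Int × (List (List (String × String))) × (List (List (String × String)))) :=
  pvLoopB blocks batch_size overlap max_chars blocks 0 [] 0 0 []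

-- ===== PRECONDITION & SPEC =====
-- Pre_ excludes nonempty blocks with batch_size ≤ 0, on which Python A loops forever,
-- and nonempty blocks missing the "text" key, on which Python A raises KeyError.
def Pre_build_char_aware_batches (blocks : List (List (String × String))) (batch_size : Int) (overlap : Int) (max_chars : Int) : Prop :=
  blocks = [] ∨ (1 ≤ batch_size ∧ ∀ b ∈ blocks, (PySem.Dict.get? (PySem.Dict.mk b) "text").isSome)
instance (blocks : List (List (String × String))) (batch_size : Int) (overlap : Int) (max_chars : Int) : Decidable (Pre_build_char_aware_batches blocks batch_size overlap max_chars) := by unfold Pre_build_char_aware_batches; infer_instance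

def pvWitness_build_char_aware_batches : (List (List (String × String))) × Int × Int × Int :=
  ([[("text", "hello")], [("text", "world!")], [("text", "x")]], 2, 1, 8)

def Spec_build_char_aware_batches (blocks : List (List (String × String))) (batch_size : Int) (overlap : Int) (max_chars : Int) (out : List (Int × (List (List (String × String))) × (List (List (String × String))))) : Prop := out = build_char_aware_batches_alt blocks batch_size overlap max_chars
instance (blocks : List (List (String × String))) (batch_size : Int) (overlap : Int) (max_chars : Int) (out : List (Int × (List (List (String × String))) × (List (List (String × String))))) : Decidable (Spec_build_char_aware_batches blocks batch_size overlap max_chars out) := by unfold Spec_build_char_aware_batches; infer_instance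

-- ===== CLAIM (what is proved, stated in full; the proofs are below) =====
def Claim_equal_build_char_aware_batches : Prop := ∀ (blocks : List (List (String × String))) (batch_size : Int) (overlap : Int) (max_chars : Int), Dom_build_char_aware_batches blocks batch_size overlap max_chars → Pre_build_char_aware_batches blocks batch_size overlap max_chars → Spec_build_char_aware_batches blocks batch_size overlap max_chars (build_char_aware_batches blocks batch_size overlap max_chars)

-- ===== LEMMAS AND PROOFS =====

-- the inner loop never moves its index backwards
theorem pvInnerA_le_snd (blocks : List (List (String × String))) (bs mc : Int) (j : Nat) (nb : List (List (String × String))) (cc : Int) : j ≤ (pvInnerA blocks bs mc j nb cc).2 := by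
  fun_induction pvInnerA blocks bs mc j nb cc with
  | case1 => simp
  | case2 => omega
  | case3 => simp

-- starting a batch with batch_size ≥ 1 always takes the first block
theorem pvInnerA_start (blocks : List (List (String × String))) (bs mc : Int) (hbs : 1 ≤ bs) (i : Nat) (hi : i < blocks.length) :
    pvInnerA blocks bs mc i [] 0 = pvInnerA blocks bs mc (i + 1) [blocks[i]] (pvTextLen blocks[i]) := by
  rw [pvInnerA]
  rw [dif_pos ⟨hi, by simp; omega⟩]
  simp

-- main simulation: B's loop with a nonempty running batch equals A finishing that batch
-- with its inner loop and then continuing with the outer loop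
theorem pvLoopB_sim (blocks : List (List (String × String))) (bs ov mc : Int) (hbs : 1 ≤ bs) :
    ∀ j, j ≤ blocks.length → ∀ cur, cur ≠ [] → ∀ chars start acc,
    pvLoopB blocks bs ov mc (blocks.drop j) j cur chars start acc
      = pvOuterA blocks bs ov mc (pvInnerA blocks bs mc j cur chars).2 ((acc.length : Int) + 1)
          (acc ++ [((acc.length : Int) + 1, pvCtx blocks start ov, (pvInnerA blocks bs mc j cur chars).1)]) := by
  suffices H : ∀ n j, blocks.length - j ≤ n → j ≤ blocks.length → ∀ cur, cur ≠ [] → ∀ chars start acc,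
      pvLoopB blocks bs ov mc (blocks.drop j) j cur chars start acc
        = pvOuterA blocks bs ov mc (pvInnerA blocks bs mc j cur chars).2 ((acc.length : Int) + 1)
            (acc ++ [((acc.length : Int) + 1, pvCtx blocks start ov, (pvInnerA blocks bs mc j cur chars).1)]) by
    intro j hj cur hcur chars start acc
    exact H (blocks.length - j) j le_rfl hj cur hcur chars start acc
  intro n
  induction n with
  | zero =>
    intro j hle hj cur hcur chars start acc
    have hj' : j = blocks.length := by omega
    subst hj'
    rw [List.drop_length]
    rw [pvInnerA, dif_neg (by simp)]
    rw [pvOuterA, dif_neg (by simp)]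
    simp [pvLoopB, hcur]
  | succ n IH =>
    intro j hle hj cur hcur chars start acc
    rcases Nat.lt_or_ge j blocks.length with hjl | hjl
    · -- j < blocks.length
      rw [List.drop_eq_getElem_cons hjl]
      set b := blocks[j] with hb
      simp only [pvLoopB]
      by_cases hfl : cur ≠ [] ∧ (bs ≤ (cur.length : Int) ∨ chars + pvTextLen b > mc)
      · -- flush
        rw [if_pos hfl]
        have hstop : pvInnerA blocks bs mc j cur chars = (cur, j) := by
          by_cases hlen : (cur.length : Int) < bs
          · have hem : chars + pvTextLen b > mc := by
              rcases hfl.2 with h1 | h1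
              · omega
              · exact h1
            rw [pvInnerA, dif_pos ⟨hjl, hlen⟩]
            simp only [← hb]
            rw [if_pos ⟨hcur, hem⟩]
          · rw [pvInnerA, dif_neg (by tauto)]
        rw [IH (j + 1) (by omega) (by omega) [b] (by simp) (pvTextLen b) j
            (acc ++ [((acc.length : Int) + 1, pvCtx blocks start ov, cur)])]
        rw [hstop]
        conv_rhs => rw [pvOuterA, dif_pos hjl]
        have hr : pvInnerA blocks bs mc j [] 0 = pvInnerA blocks bs mc (j + 1) [b] (pvTextLen b) := by
          rw [pvInnerA_start blocks bs mc hbs j hjl, hb]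
        simp only [hr]
        rw [dif_pos (by have := pvInnerA_le_snd blocks bs mc (j + 1) [b] (pvTextLen b); omega)]
        simp only [List.length_append, List.length_cons, List.length_nil]
        push_cast
        ring_nf
      · -- no flush
        rw [if_neg hfl]
        have hlen : (cur.length : Int) < bs ∧ ¬ chars + pvTextLen b > mc := by
          constructor
          · by_contra hcon
            exact hfl ⟨hcur, Or.inl (by omega)⟩
          · intro hcon
            exact hfl ⟨hcur, Or.inr hcon⟩
        have hcont : pvInnerA blocks bs mc j cur chars
            = pvInnerA blocks bs mc (j + 1) (cur ++ [b]) (chars + pvTextLen b) := by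
          rw [pvInnerA, dif_pos ⟨hjl, hlen.1⟩]
          simp only [← hb]
          rw [if_neg (by intro hcon; exact hlen.2 hcon.2)]
        rw [IH (j + 1) (by omega) (by omega) (cur ++ [b]) (by simp) (chars + pvTextLen b) start acc]
        rw [hcont]
    · -- j = blocks.length
      have hj' : j = blocks.length := by omega
      subst hj'
      rw [List.drop_length]
      rw [pvInnerA, dif_neg (by simp)]
      rw [pvOuterA, dif_neg (by simp)]
      simp [pvLoopB, hcur]

theorem build_char_aware_batches_spec : Claim_equal_build_char_aware_batches := by
  intro blocks batch_size overlap max_chars _hdom hpre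
  unfold Spec_build_char_aware_batches build_char_aware_batches build_char_aware_batches_alt
  cases blocks with
  | nil =>
    rw [pvOuterA, dif_neg (by simp)]
    simp [pvLoopB]
  | cons b rest =>
    have hbs : 1 ≤ batch_size := by
      rcases hpre with h | ⟨hbs, -⟩
      · exact absurd h (by simp)
      · exact hbs
    have h0 : 0 < (b :: rest).length := by simp
    conv_lhs => rw [pvOuterA, dif_pos h0]
    have hr : pvInnerA (b :: rest) batch_size max_chars 0 [] 0
        = pvInnerA (b :: rest) batch_size max_chars 1 [b] (pvTextLen b) := by
      rw [pvInnerA_start (b :: rest) batch_size max_chars hbs 0 h0]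
      simp
    simp only [hr]
    rw [dif_pos (by have := pvInnerA_le_snd (b :: rest) batch_size max_chars 1 [b] (pvTextLen b); omega)]
    have hB : pvLoopB (b :: rest) batch_size overlap max_chars (b :: rest) 0 [] 0 0 []
        = pvLoopB (b :: rest) batch_size overlap max_chars ((b :: rest).drop 1) 1 [b] (pvTextLen b) 0 [] := by
      simp [pvLoopB]
    rw [hB, pvLoopB_sim (b :: rest) batch_size overlap max_chars hbs 1 (by simp) [b] (by simp) (pvTextLen b) 0 []]
    norm_num
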